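-- pv_equiv track=rewrite | github.com/ejodude/taxonomer_parsing | process_classifier_count.py | process_classify_file
-- ===== SOURCE A (Python) =====
-- import copy
--
-- def process_classify_file( data ):
-- 	"""
-- 	#iterates over file and counts the number of times a read is
-- 	#classfied to each unique ID number. This loop parses output from single
-- 	#classfier database run.
--
-- 	data - taxonomer object data structure with returned classified lines in list format
-- 	id_dict - parsed key file results with counter for read count tracking
-- 	"""
-- 	#print data
-- 	#pull results from itertools
-- 	results = data[0]
-- 	id_dict = data[1]
--
-- 	#process the object and append counters
-- 	RV = copy.deepcopy(id_dict) #dictionary of returned results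
-- 	for result in results: #iterate over lines.
-- 		result = result.split("\t")
-- 		taxid = result[3]
-- 		RV[ taxid ][1] += 1
--
-- 	return( RV ) #return modified dictioanry with updated counts
-- ===== SOURCE B (Python) =====
-- def process_classify_file(data):
--     # tally-then-merge: count taxids first, then rebuild the dict applying counts
--     results, id_dict = data
--     counts = {}
--     for result in results:
--         taxid = result.split("\t")[3]
--         counts[taxid] = counts.get(taxid, 0) + 1
--     return {k: [x + counts.get(k, 0) if i == 1 else x for i, x in enumerate(v)]
--             for k, v in id_dict.items()}
-- ===== Notes on version B (the rewrite author's own statement) =====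
-- stated objective: alternative
-- what changed: Replaces A's single interleaved scan that mutates a deepcopy per line with a tally-then-merge decomposition: one pass builds a taxid frequency table, then a dict comprehension rebuilds id_dict applying each aggregated count once at index 1.
import Mathlib
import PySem

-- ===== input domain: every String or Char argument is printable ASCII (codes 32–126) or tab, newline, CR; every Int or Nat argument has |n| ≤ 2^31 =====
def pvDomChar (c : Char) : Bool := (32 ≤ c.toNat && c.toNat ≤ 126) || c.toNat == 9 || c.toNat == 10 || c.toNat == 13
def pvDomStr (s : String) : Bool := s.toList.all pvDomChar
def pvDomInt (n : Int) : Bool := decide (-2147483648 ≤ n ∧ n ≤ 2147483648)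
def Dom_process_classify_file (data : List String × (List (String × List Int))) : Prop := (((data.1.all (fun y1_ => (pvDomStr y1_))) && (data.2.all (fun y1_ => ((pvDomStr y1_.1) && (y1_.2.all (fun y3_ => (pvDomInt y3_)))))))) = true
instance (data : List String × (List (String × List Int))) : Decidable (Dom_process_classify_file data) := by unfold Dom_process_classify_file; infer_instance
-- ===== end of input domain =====

-- B changes the decomposition only (tally taxids in one pass, then merge the aggregated counts
-- into a rebuilt dict), not the cost; equivalence is proved on inputs where A raises no exception.

-- result.split("\t")  (the separator is never empty, so split? is always `some`; exact here)
def pcfSplit (r : String) : List String := (PySem.Str.split? r "\t").getD []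

-- taxid = result.split("\t")[3]  (none = IndexError, excluded by Pre_)
def pcfTax (r : String) : Option String := PySem.List.pyGet? (pcfSplit r) 3

-- ===== PORT A =====


-- RV[taxid][1] += 1 on the value list (identity when index 1 is out of range; Pre_ excludes that)
def pcfBump (v : List Int) : List Int :=
  match PySem.List.pyGet? v 1 with
  | some x => PySem.List.pySetD v 1 (x + 1)
  | none => v

-- one iteration of A's loop body
def pcfStepA (RV : PySem.Dict String (List Int)) (result : String) : PySem.Dict String (List Int) :=
  match pcfTax result with
  | some taxid =>
    match RV.get? taxid with
    | some v => RV.insert taxid (pcfBump v)   -- RV[taxid][1] += 1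
    | none => RV                              -- KeyError (excluded by Pre_)
  | none => RV                                -- IndexError (excluded by Pre_)

def process_classify_file (data : List String × (List (String × List Int))) : List (String × List Int) :=
  let results := data.1
  let id_dict := data.2
  (results.foldl pcfStepA (PySem.Dict.mk id_dict)).items

-- ===== PORT B =====

-- one iteration of B's counting loop
def pcfStepC (c : PySem.Dict String Int) (result : String) : PySem.Dict String Int :=
  match pcfTax result with
  | some taxid => c.insert taxid (c.getD taxid 0 + 1)  -- counts[taxid] = counts.get(taxid, 0) + 1
  | none => c                                          -- IndexError (excluded by Pre_)

-- [x + counts.get(k, 0) if i == 1 else x for i, x in enumerate(v)]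
def pcfVal (counts : PySem.Dict String Int) (p : String × List Int) : List Int :=
  (PySem.List.enumerate p.2).map (fun ix => if ix.1 = 1 then ix.2 + counts.getD p.1 0 else ix.2)

-- one entry of B's rebuilding dict comprehension
def pcfMerge (counts : PySem.Dict String Int) (RV : PySem.Dict String (List Int))
    (p : String × List Int) : PySem.Dict String (List Int) :=
  RV.insert p.1 (pcfVal counts p)

def process_classify_file_alt (data : List String × (List (String × List Int))) : List (String × List Int) :=
  let counts := data.1.foldl pcfStepC (PySem.Dict.empty : PySem.Dict String Int)
  (data.2.foldl (pcfMerge counts) (PySem.Dict.empty : PySem.Dict String (List Int))).items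

-- ===== PRECONDITION & SPEC =====
-- Pre_ excludes (a) lines with fewer than 4 tab-fields (A raises IndexError), (b) lines whose
-- taxid is not a key of id_dict (A raises KeyError), (c) hit value lists shorter than 2
-- (A raises IndexError there), and (d) association lists with duplicate keys, which a Python
-- dict cannot represent (both programs see the deduplicated dict and agree).
def Pre_process_classify_file (data : List String × (List (String × List Int))) : Prop :=
  (data.2.map Prod.fst).Nodup ∧
  ∀ r ∈ data.1,
    4 ≤ (pcfSplit r).length ∧
    ∃ p ∈ data.2, p.1 = (pcfSplit r).getD 3 "" ∧ 2 ≤ p.2.length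

instance (data : List String × (List (String × List Int))) : Decidable (Pre_process_classify_file data) := by
  unfold Pre_process_classify_file; infer_instance

def pvWitness_process_classify_file : (List String × (List (String × List Int))) :=
  (["r1\tC\t1\ta", "r2\tC\t1\ta"], [("a", [5, 0]), ("b", [7, 1])])

def Spec_process_classify_file (data : List String × (List (String × List Int))) (out : List (String × List Int)) : Prop := out = process_classify_file_alt data
instance (data : List String × (List (String × List Int))) (out : List (String × List Int)) : Decidable (Spec_process_classify_file data out) := by unfold Spec_process_classify_file; infer_instance

-- ===== CLAIM (what is proved, stated in full; the proofs are below) =====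
def Claim_equal_process_classify_file : Prop := ∀ (data : List String × (List (String × List Int))), Dom_process_classify_file data → Pre_process_classify_file data → Spec_process_classify_file data (process_classify_file data)

-- ===== LEMMAS AND PROOFS =====

def pcfCount (k : String) (rs : List String) : Nat :=
  rs.countP (fun r => decide (pcfTax r = some k))

-- n-fold bump
def pcfIter : Nat → List Int → List Int
  | 0, v => v
  | n + 1, v => pcfIter n (pcfBump v)

theorem pcfCount_cons (k r : String) (rs : List String) :
    pcfCount k (r :: rs) = pcfCount k rs + (if pcfTax r = some k then 1 else 0) := by
  simp [pcfCount, List.countP_cons]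

theorem pcfBump_closed (v : List Int) :
    pcfBump v = match v with
      | a :: b :: r => a :: (b + 1) :: r
      | v => v := by
  match v with
  | [] => rfl
  | [a] => rfl
  | a :: b :: r =>
    simp [pcfBump, PySem.List.pyGet?, PySem.List.pyIdx?, PySem.List.pySetD, PySem.List.pySet?]

theorem pcfIter_nil (n : Nat) : pcfIter n [] = [] := by
  induction n with
  | zero => rfl
  | succ n ih => simpa [pcfIter, pcfBump_closed] using ih

theorem pcfIter_single (n : Nat) (a : Int) : pcfIter n [a] = [a] := by
  induction n with
  | zero => rfl
  | succ n ih => simpa [pcfIter, pcfBump_closed] using ih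

theorem pcfIter_closed (n : Nat) (a b : Int) (r : List Int) :
    pcfIter n (a :: b :: r) = a :: (b + n) :: r := by
  induction n generalizing b with
  | zero => simp [pcfIter]
  | succ n ih =>
    simp only [pcfIter, pcfBump_closed, ih]
    congr 1
    push_cast
    ring_nf

-- the map over enumerate is the identity once all indices are ≥ 2
theorem enum_map_id (n : Int) (v : List Int) (s : Int) (hs : 2 ≤ s) :
    (PySem.List.enumerate v s).map (fun ix => if ix.1 = 1 then ix.2 + n else ix.2) = v := by
  induction v generalizing s with
  | nil => simp [PySem.List.enumerate_nil]
  | cons a t ih =>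
    rw [PySem.List.enumerate_cons]
    simp only [List.map_cons]
    rw [if_neg (by omega), ih (s + 1) (by omega)]

theorem enumAdd_closed (v : List Int) (n : Int) :
    (PySem.List.enumerate v).map (fun ix => if ix.1 = 1 then ix.2 + n else ix.2) =
    match v with
      | a :: b :: r => a :: (b + n) :: r
      | v => v := by
  match v with
  | [] => simp [PySem.List.enumerate_nil]
  | [a] => simp [PySem.List.enumerate_cons, PySem.List.enumerate_nil]
  | a :: b :: r =>
    rw [PySem.List.enumerate_cons, PySem.List.enumerate_cons]
    simp only [List.map_cons]
    norm_num
    exact enum_map_id n r (0 + 1 + 1) (by norm_num)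

theorem pcfIter_eq_enumAdd (n : Nat) (v : List Int) :
    pcfIter n v =
    (PySem.List.enumerate v).map (fun ix => if ix.1 = 1 then ix.2 + (n : Int) else ix.2) := by
  rw [enumAdd_closed]
  match v with
  | [] => exact pcfIter_nil n
  | [a] => exact pcfIter_single n a
  | a :: b :: r => exact pcfIter_closed n a b r

-- B's counter fold computes pcfCount
theorem counter_getD (rs : List String) (c : PySem.Dict String Int) (k : String) :
    (rs.foldl pcfStepC c).getD k 0 = c.getD k 0 + (pcfCount k rs : Int) := by
  induction rs generalizing c with
  | nil => simp [pcfCount]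
  | cons r rs ih =>
    rw [List.foldl_cons, ih, pcfCount_cons]
    match h : pcfTax r with
    | none =>
      simp only [pcfStepC, h]
      simp
    | some t =>
      simp only [pcfStepC, h, PySem.Dict.getD_insert]
      by_cases hk : k = t
      · subst hk
        rw [if_pos rfl, if_pos rfl]
        push_cast
        omega
      · rw [if_neg hk, if_neg (show ¬ (some t = some k) from fun e => hk (Option.some.inj e).symm)]
        omega

-- A's fold: the key list never changes, and each stored value is bumped once per hit
theorem foldA_char (rs : List String) (d : PySem.Dict String (List Int)) :
    (rs.foldl pcfStepA d).keys = d.keys ∧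
    ∀ k, d.contains k = true →
      (rs.foldl pcfStepA d).getD k [] = pcfIter (pcfCount k rs) (d.getD k []) := by
  induction rs generalizing d with
  | nil => exact ⟨rfl, fun k _ => by simp [pcfCount, pcfIter]⟩
  | cons r rs ih =>
    rw [List.foldl_cons]
    match h : pcfTax r with
    | none =>
      have hs : pcfStepA d r = d := by simp only [pcfStepA, h]
      rw [hs]
      refine ⟨(ih d).1, fun k hk => ?_⟩
      rw [(ih d).2 k hk, pcfCount_cons, h]
      simp
    | some t =>
      match hg : d.get? t with
      | none =>
        have hs : pcfStepA d r = d := by simp only [pcfStepA, h, hg]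
        rw [hs]
        refine ⟨(ih d).1, fun k hk => ?_⟩
        rw [(ih d).2 k hk, pcfCount_cons]
        have hnk : ¬ (some t = some k) := by
          intro e
          have hkt : k = t := (Option.some.inj e).symm
          subst hkt
          rw [PySem.Dict.contains_eq_isSome_get?, hg] at hk
          simp at hk
        rw [h, if_neg hnk]
        simp
      | some v =>
        have hs : pcfStepA d r = d.insert t (pcfBump v) := by simp only [pcfStepA, h, hg]
        rw [hs]
        have hct : d.contains t = true := by
          rw [PySem.Dict.contains_eq_isSome_get?, hg]; rfl
        have hkeys : (d.insert t (pcfBump v)).keys = d.keys :=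
          PySem.Dict.keys_insert_of_contains _ _ hct
        refine ⟨(ih _).1.trans hkeys, fun k hk => ?_⟩
        have hck : (d.insert t (pcfBump v)).contains k = true := by
          rw [PySem.Dict.contains_insert]; simp [hk]
        rw [(ih _).2 k hck, PySem.Dict.getD_insert, pcfCount_cons]
        by_cases hkt : k = t
        · subst hkt
          rw [if_pos rfl, h, if_pos rfl]
          have hd : d.getD k [] = v := by
            rw [PySem.Dict.getD_eq_get?_getD, hg]; rfl
          rw [hd]
          -- pcfIter (n + 1) v = pcfIter n (pcfBump v)
          rfl
        · rw [if_neg hkt, h,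
              if_neg (show ¬ (some t = some k) from fun e => hkt (Option.some.inj e).symm)]
          simp

-- B's rebuilding fold over fresh distinct keys appends one entry per pair
theorem foldB_items (c : PySem.Dict String Int) (l : List (String × List Int)) :
    ∀ (d : PySem.Dict String (List Int)), (∀ p ∈ l, d.contains p.1 = false) →
      (l.map Prod.fst).Nodup →
      (l.foldl (pcfMerge c) d).items = d.items ++ l.map (fun p => (p.1, pcfVal c p)) := by
  induction l with
  | nil => intro d _ _; simp
  | cons p l ih =>
    intro d hfresh hnd
    rw [List.foldl_cons]
    have hp : d.contains p.1 = false := hfresh p (List.mem_cons_self ..)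
    have hfresh' : ∀ q ∈ l, (pcfMerge c d p).contains q.1 = false := by
      intro q hq
      rw [pcfMerge, PySem.Dict.contains_insert]
      have hne : q.1 ≠ p.1 := by
        intro e
        have : p.1 ∈ l.map Prod.fst := e ▸ List.mem_map_of_mem hq
        exact (List.nodup_cons.mp (by simpa using hnd)).1 this
      simp [hne, hfresh q (List.mem_cons_of_mem _ hq)]
    rw [ih (pcfMerge c d p) hfresh' (List.nodup_cons.mp (by simpa using hnd)).2]
    rw [pcfMerge, PySem.Dict.items_insert_of_not_contains _ _ hp]
    simp

-- ===== VERDICT (by name: the statement is the Claim_ definition above) =====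
theorem process_classify_file_spec : Claim_equal_process_classify_file := by
  intro data _hdom hpre
  obtain ⟨hnd, hlines⟩ := hpre
  unfold Spec_process_classify_file process_classify_file process_classify_file_alt
  obtain ⟨hkeys, hgetD⟩ := foldA_char data.1 (PySem.Dict.mk data.2)
  dsimp only
  -- right-hand side: a fold of inserts over fresh distinct keys
  rw [foldB_items _ data.2 PySem.Dict.empty (fun p _ => PySem.Dict.contains_empty _) hnd]
  -- left-hand side: items via keys + getD
  have hndA : (data.1.foldl pcfStepA (PySem.Dict.mk data.2)).keys.Nodup := by
    rw [hkeys]; exact hnd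
  rw [PySem.Dict.items_eq_map_keys _ hndA [], hkeys]
  have : (PySem.Dict.mk data.2).keys = data.2.map Prod.fst := rfl
  rw [this, List.map_map]
  have hemp : (PySem.Dict.empty : PySem.Dict String (List Int)).items = [] := rfl
  rw [hemp, List.nil_append]
  apply List.map_congr_left
  intro p hp
  have hmem : p ∈ (PySem.Dict.mk data.2).items := hp
  have hg0 : (PySem.Dict.mk data.2).getD p.1 [] = p.2 := by
    obtain ⟨k, v⟩ := p
    exact PySem.Dict.getD_of_mem_items _ hmem hnd _
  have hc : (PySem.Dict.mk data.2).contains p.1 = true := by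
    rw [PySem.Dict.contains_eq_isSome_get?,
        PySem.Dict.get?_of_mem_items (d := PySem.Dict.mk data.2) (k := p.1) (v := p.2)
          (by exact hmem) hnd]
    rfl
  have hA := hgetD p.1 hc
  rw [hg0] at hA
  simp only [Function.comp]
  rw [hA, pcfVal, counter_getD, PySem.Dict.getD_empty, pcfIter_eq_enumAdd]
  norm_num
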